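-- pv_equiv track=rewrite | github.com/kshramt/bin | rdeps.py | filter_dag
-- ===== SOURCE A (Python) =====
-- def filter_dag(dag, targets, ret=None):
--     if ret is None:
--         ret = {}
--     for target in targets:
--         if (not (target in ret)) and (target in dag):
--             deps = dag[target]
--             ret[target] = deps
--             filter_dag(dag, deps, ret)
--     return ret
-- ===== SOURCE B (Python) =====
-- def filter_dag(dag, targets, ret=None):
--     if ret is None:
--         ret = {}
--     stack = list(reversed(targets))
--     while stack:
--         node = stack.pop()
--         if node not in ret and node in dag:
--             deps = dag[node]
--             ret[node] = deps
--             stack.extend(reversed(deps))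
--     return ret
-- ===== Notes on version B (the rewrite author's own statement) =====
-- stated objective: alternative
-- what changed: Replaces the recursive preorder traversal with an iterative explicit-stack DFS (children pushed in reverse so the dict insertion order is identical).
import Mathlib
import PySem

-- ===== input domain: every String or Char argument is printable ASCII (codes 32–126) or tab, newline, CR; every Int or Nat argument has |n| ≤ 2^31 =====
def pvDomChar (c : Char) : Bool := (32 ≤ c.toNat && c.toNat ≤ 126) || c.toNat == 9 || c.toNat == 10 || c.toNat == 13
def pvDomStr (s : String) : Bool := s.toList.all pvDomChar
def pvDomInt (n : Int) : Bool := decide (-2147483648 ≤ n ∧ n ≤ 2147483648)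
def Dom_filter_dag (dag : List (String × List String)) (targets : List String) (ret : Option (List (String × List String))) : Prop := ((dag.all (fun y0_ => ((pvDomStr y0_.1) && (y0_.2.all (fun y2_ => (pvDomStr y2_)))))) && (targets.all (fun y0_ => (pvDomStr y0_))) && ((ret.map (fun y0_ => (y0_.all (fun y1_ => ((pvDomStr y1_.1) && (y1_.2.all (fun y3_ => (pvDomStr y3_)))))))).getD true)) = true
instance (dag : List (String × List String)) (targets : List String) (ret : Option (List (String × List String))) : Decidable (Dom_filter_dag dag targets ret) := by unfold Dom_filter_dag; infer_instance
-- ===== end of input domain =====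

-- B replaces A's recursive preorder DFS with an iterative explicit-stack DFS (same output, incl. insertion order);
-- both A and B mutate a caller-supplied `ret` dict in place — the equivalence proved here is about the return value.

-- `target in d` on an insertion-ordered dict represented as an association list
def pvKeyMem (d : List (String × List String)) (k : String) : Bool := d.any (fun p => p.1 == k)
-- `d[target]` (first match; keys of a real Python dict are unique)
def pvKeyGet? (d : List (String × List String)) (k : String) : Option (List String) := (List.find? (fun p => p.1 == k) d).map (·.2)
-- termination measure: number of dag entries whose key is not yet in ret
def pvPending (dag ret : List (String × List String)) : Nat := (dag.filter (fun p => !pvKeyMem ret p.1)).length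

theorem pvKeyMem_append (l1 l2 : List (String × List String)) (k : String) : pvKeyMem (l1 ++ l2) k = (pvKeyMem l1 k || pvKeyMem l2 k) := by
  simp [pvKeyMem, List.any_append]

theorem pvPending_eq_countP (dag ret : List (String × List String)) :
    pvPending dag ret = dag.countP (fun p => !pvKeyMem ret p.1) := by
  rw [pvPending, List.countP_eq_length_filter]

theorem pvKeyMem_append_imp' (ret ext l : List (String × List String)) :
    ∀ p ∈ l, (fun p : String × List String => !pvKeyMem (ret ++ ext) p.1) p = true →
      (fun p : String × List String => !pvKeyMem ret p.1) p = true := by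
  intro p _ hp
  simp only [pvKeyMem_append, Bool.not_eq_true', Bool.or_eq_false_iff] at hp
  simpa using hp.1

theorem pvPending_lt (dag ret ext : List (String × List String)) (t : String) (deps : List String) (pd : String × List String)
    (hmem : pvKeyMem ret t = false) (hfind : List.find? (fun p => p.1 == t) dag = some pd) :
    pvPending dag (ret ++ (t, deps) :: ext) < pvPending dag ret := by
  have hpdt : pd.1 = t := by simpa using List.find?_some hfind
  obtain ⟨s, u, hdag⟩ := List.append_of_mem (List.mem_of_find?_eq_some hfind)
  have hnew : pvKeyMem (ret ++ (t, deps) :: ext) pd.1 = true := by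
    rw [pvKeyMem_append, hpdt]
    simp [pvKeyMem]
  have hold : pvKeyMem ret pd.1 = false := by rw [hpdt]; exact hmem
  have hs := List.countP_mono_left (pvKeyMem_append_imp' ret ((t, deps) :: ext) s)
  have hu := List.countP_mono_left (pvKeyMem_append_imp' ret ((t, deps) :: ext) u)
  rw [pvPending_eq_countP, pvPending_eq_countP, hdag]
  simp only [List.countP_append, List.countP_cons, hnew, hold]
  simp
  omega

-- ===== PORT A =====
-- A's recursion: for each target, if new and in dag, record it and recurse on its deps.
-- The subtype result (ret is always a prefix of the output) is only the termination invariant.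
def filterGo (dag : List (String × List String)) (targets : List String) (ret : List (String × List String)) :
    {r : List (String × List String) // ∃ ext, r = ret ++ ext} :=
  match targets with
  | [] => ⟨ret, ⟨[], by simp⟩⟩
  | t :: ts =>
    if hmem : pvKeyMem ret t = false then
      match hget : pvKeyGet? dag t with
      | some deps =>
        match filterGo dag deps (ret ++ [(t, deps)]) with
        | ⟨r1, he1⟩ =>
          match filterGo dag ts r1 with
          | ⟨r2, he2⟩ =>
            ⟨r2, by
              obtain ⟨e1, h1⟩ := he1
              obtain ⟨e2, h2⟩ := he2
              exact ⟨(t, deps) :: (e1 ++ e2), by simp [h2, h1]⟩⟩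
      | none => filterGo dag ts ret
    else filterGo dag ts ret
termination_by (pvPending dag ret, targets.length)
decreasing_by
  · apply Prod.Lex.left
    obtain ⟨pd, hpd⟩ : ∃ pd, List.find? (fun p => p.1 == t) dag = some pd := by
      unfold pvKeyGet? at hget
      cases h : List.find? (fun p => p.1 == t) dag with
      | none => rw [h] at hget; simp at hget
      | some pd => exact ⟨pd, rfl⟩
    exact pvPending_lt dag ret [] t deps pd hmem hpd
  · apply Prod.Lex.left
    obtain ⟨e1, h1⟩ := he1
    obtain ⟨pd, hpd⟩ : ∃ pd, List.find? (fun p => p.1 == t) dag = some pd := by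
      unfold pvKeyGet? at hget
      cases h : List.find? (fun p => p.1 == t) dag with
      | none => rw [h] at hget; simp at hget
      | some pd => exact ⟨pd, rfl⟩
    have : r1 = ret ++ (t, deps) :: e1 := by simpa using h1
    rw [this]
    exact pvPending_lt dag ret e1 t deps pd hmem hpd
  · apply Prod.Lex.right; simp
  · apply Prod.Lex.right; simp

def filter_dag (dag : List (String × List String)) (targets : List String) (ret : Option (List (String × List String))) : List (String × List String) :=
  (filterGo dag targets (ret.getD [])).1

-- ===== PORT B =====
-- B's loop: the Lean list `stack` is Source B's stack read top-first (Source B pushes reversed, pops the end;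
-- here `deps ++ rest` is exactly `stack.extend(reversed(deps))` seen from the top).
def altGo (dag : List (String × List String)) (stack : List String) (ret : List (String × List String)) : List (String × List String) :=
  match stack with
  | [] => ret
  | t :: rest =>
    if hmem : pvKeyMem ret t = false then
      match hget : pvKeyGet? dag t with
      | some deps => altGo dag (deps ++ rest) (ret ++ [(t, deps)])
      | none => altGo dag rest ret
    else altGo dag rest ret
termination_by (pvPending dag ret, stack.length)
decreasing_by
  · apply Prod.Lex.left
    obtain ⟨pd, hpd⟩ : ∃ pd, List.find? (fun p => p.1 == t) dag = some pd := by
      unfold pvKeyGet? at hget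
      cases h : List.find? (fun p => p.1 == t) dag with
      | none => rw [h] at hget; simp at hget
      | some pd => exact ⟨pd, rfl⟩
    exact pvPending_lt dag ret [] t deps pd hmem hpd
  · apply Prod.Lex.right; simp
  · apply Prod.Lex.right; simp

def filter_dag_alt (dag : List (String × List String)) (targets : List String) (ret : Option (List (String × List String))) : List (String × List String) :=
  altGo dag targets (ret.getD [])

-- ===== PRECONDITION & SPEC =====
def Spec_filter_dag (dag : List (String × List String)) (targets : List String) (ret : Option (List (String × List String))) (out : List (String × List String)) : Prop := out = filter_dag_alt dag targets ret
instance (dag : List (String × List String)) (targets : List String) (ret : Option (List (String × List String))) (out : List (String × List String)) : Decidable (Spec_filter_dag dag targets ret out) := by unfold Spec_filter_dag; infer_instance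

-- ===== CLAIM (what is proved, stated in full; the proofs are below) =====
def Claim_equal_filter_dag : Prop := ∀ (dag : List (String × List String)) (targets : List String) (ret : Option (List (String × List String))), Dom_filter_dag dag targets ret → Spec_filter_dag dag targets ret (filter_dag dag targets ret)

-- ===== LEMMAS AND PROOFS =====

theorem pvPending_append_le (dag ret ext : List (String × List String)) : pvPending dag (ret ++ ext) ≤ pvPending dag ret := by
  rw [pvPending_eq_countP, pvPending_eq_countP]
  exact List.countP_mono_left (pvKeyMem_append_imp' ret ext dag)


theorem filterGo_nil (dag ret) : (filterGo dag [] ret).1 = ret := by rw [filterGo]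

theorem filterGo_cons_skip (dag t ts ret) (h : ¬ (pvKeyMem ret t = false)) :
    (filterGo dag (t :: ts) ret).1 = (filterGo dag ts ret).1 := by
  rw [filterGo, dif_neg h]

theorem filterGo_cons_none (dag t ts ret) (h : pvKeyMem ret t = false) (hg : pvKeyGet? dag t = none) :
    (filterGo dag (t :: ts) ret).1 = (filterGo dag ts ret).1 := by
  rw [filterGo, dif_pos h]
  split
  · rename_i deps' heq
    rw [hg] at heq
    simp at heq
  · rfl

theorem filterGo_cons_some (dag t ts ret deps) (h : pvKeyMem ret t = false) (hg : pvKeyGet? dag t = some deps) :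
    (filterGo dag (t :: ts) ret).1 = (filterGo dag ts (filterGo dag deps (ret ++ [(t, deps)])).1).1 := by
  rw [filterGo, dif_pos h]
  split
  · rename_i deps' heq
    rw [hg] at heq
    obtain rfl : deps = deps' := Option.some.inj heq
    rfl
  · rename_i heq
    rw [hg] at heq
    simp at heq

theorem altGo_nil (dag ret) : altGo dag [] ret = ret := by rw [altGo]

theorem altGo_cons_skip (dag t rest ret) (h : ¬ (pvKeyMem ret t = false)) :
    altGo dag (t :: rest) ret = altGo dag rest ret := by
  rw [altGo, dif_neg h]

theorem altGo_cons_none (dag t rest ret) (h : pvKeyMem ret t = false) (hg : pvKeyGet? dag t = none) :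
    altGo dag (t :: rest) ret = altGo dag rest ret := by
  rw [altGo, dif_pos h]
  split
  · rename_i deps' heq
    rw [hg] at heq
    simp at heq
  · rfl

theorem altGo_cons_some (dag t rest ret deps) (h : pvKeyMem ret t = false) (hg : pvKeyGet? dag t = some deps) :
    altGo dag (t :: rest) ret = altGo dag (deps ++ rest) (ret ++ [(t, deps)]) := by
  rw [altGo, dif_pos h]
  split
  · rename_i deps' heq
    rw [hg] at heq
    obtain rfl : deps = deps' := Option.some.inj heq
    rfl
  · rename_i heq
    rw [hg] at heq
    simp at heq

theorem altGo_filterGo (dag : List (String × List String)) :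
    ∀ (n : ℕ) (targets : List String) (ret : List (String × List String)), pvPending dag ret ≤ n →
      ∀ rest, altGo dag (targets ++ rest) ret = altGo dag rest (filterGo dag targets ret).1 := by
  intro n
  induction n using Nat.strong_induction_on with
  | _ n IHn =>
    intro targets
    induction targets with
    | nil => intro ret _ rest; rw [filterGo_nil]; rfl
    | cons t ts IHts =>
      intro ret hret rest
      by_cases hmem : pvKeyMem ret t = false
      · cases hget : pvKeyGet? dag t with
        | none =>
          rw [List.cons_append, altGo_cons_none dag t (ts ++ rest) ret hmem hget,
            IHts ret hret rest, filterGo_cons_none dag t ts ret hmem hget]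
        | some deps =>
          have hfind : ∃ pd, List.find? (fun p => p.1 == t) dag = some pd := by
            unfold pvKeyGet? at hget
            cases h : List.find? (fun p => p.1 == t) dag with
            | none => rw [h] at hget; simp at hget
            | some pd => exact ⟨pd, rfl⟩
          obtain ⟨pd, hpd⟩ := hfind
          have hlt : pvPending dag (ret ++ [(t, deps)]) < pvPending dag ret :=
            pvPending_lt dag ret [] t deps pd hmem hpd
          have hltn : pvPending dag (ret ++ [(t, deps)]) < n := lt_of_lt_of_le hlt hret
          rw [List.cons_append, altGo_cons_some dag t (ts ++ rest) ret deps hmem hget]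
          rw [IHn _ hltn deps (ret ++ [(t, deps)]) (le_refl _) (ts ++ rest)]
          obtain ⟨e1, h1⟩ := (filterGo dag deps (ret ++ [(t, deps)])).2
          have hle2 : pvPending dag (filterGo dag deps (ret ++ [(t, deps)])).1 ≤ pvPending dag (ret ++ [(t, deps)]) := by
            rw [h1]; exact pvPending_append_le dag _ e1
          rw [IHn _ hltn ts (filterGo dag deps (ret ++ [(t, deps)])).1 hle2 rest]
          rw [filterGo_cons_some dag t ts ret deps hmem hget]
      · rw [List.cons_append, altGo_cons_skip dag t (ts ++ rest) ret hmem,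
          IHts ret hret rest, filterGo_cons_skip dag t ts ret hmem]

-- ===== VERDICT (by name: the statement is the Claim_ definition above) =====
theorem filter_dag_spec : Claim_equal_filter_dag := by
  intro dag targets ret _
  unfold Spec_filter_dag filter_dag filter_dag_alt
  have h := altGo_filterGo dag (pvPending dag (ret.getD [])) targets (ret.getD []) (le_refl _) []
  rw [List.append_nil] at h
  rw [h, altGo_nil]
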